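-- pv_equiv track=rewrite | github.com/tomjmwang/Linear-Regression-For-OPRA | linear.py | selection_predictor
-- ===== SOURCE A (Python) =====
-- def selection_predictor(rank1,rank2):
--     moves = []
--     dist = 0
--     for i in range(len(rank2)):
--         if rank1[i] != rank2[i]:
--             for j in range(i+1,len(rank1)):
--                 if rank1[j] == rank2[i]:
--                     rank1.insert(i,rank1.pop(j))
--                     action = (i,j,i)
--                     moves.append(action)
--                     dist += j-i
--                     break
--     return (len(moves),moves,dist)
-- ===== SOURCE B (Python) =====
-- def selection_predictor(rank1, rank2):
--     # Consumes a shrinking suffix of the (unmutated) original list instead of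
--     # repeatedly inserting/popping in rank1; note: unlike A, B does NOT mutate rank1.
--     suffix = list(rank1)
--     moves = []
--     dist = 0
--     for i, t in enumerate(rank2):
--         if suffix[0] != t and t in suffix[1:]:
--             k = suffix[1:].index(t) + 1
--             moves.append((i, i + k, i))
--             dist += k
--             del suffix[k]
--         else:
--             del suffix[0]
--     return (len(moves), moves, dist)
-- ===== Notes on version B (the rewrite author's own statement) =====
-- stated objective: simpler
-- what changed: B never mutates/rebuilds the full list: it consumes a shrinking suffix of the original ranking, locating each target by one index lookup in the suffix and deleting it, instead of A's positional rescan of the mutated rank1 with insert(i, pop(j)).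
import Mathlib
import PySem

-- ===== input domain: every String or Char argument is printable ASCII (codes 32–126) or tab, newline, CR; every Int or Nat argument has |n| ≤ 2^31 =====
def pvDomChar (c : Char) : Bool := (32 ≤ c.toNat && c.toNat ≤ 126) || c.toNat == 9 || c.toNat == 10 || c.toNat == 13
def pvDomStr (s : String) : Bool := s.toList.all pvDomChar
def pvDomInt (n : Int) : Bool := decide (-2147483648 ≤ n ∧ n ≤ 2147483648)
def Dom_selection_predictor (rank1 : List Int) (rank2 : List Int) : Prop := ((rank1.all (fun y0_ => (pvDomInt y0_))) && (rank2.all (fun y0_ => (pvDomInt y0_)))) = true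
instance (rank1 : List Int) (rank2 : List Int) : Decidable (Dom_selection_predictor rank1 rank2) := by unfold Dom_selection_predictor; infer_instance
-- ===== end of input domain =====

-- ===== PORT A =====
-- B replaces A's insert/pop rescan of the mutated rank1 by consuming a shrinking suffix (objective: simpler).
-- NOTE: Python A mutates its argument rank1 in place; the equivalence proved here is about the RETURN value only.

-- final wrapper: Python's 'return (len(moves), moves, dist)'
def pvAfin (st : List Int × (List (Int × Int × Int)) × Int) : Int × (List (Int × Int × Int)) × Int :=
  ((st.2.1.length : Int), st.2.1, st.2.2)

-- one iteration of A's outer 'for i in range(len(rank2))' loop; the inner 'for j … break'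
-- acts only at its break, so it is the first j in range(i+1, len(rank1)) with rank1[j] == rank2[i]
def pvA_step (rank2 : List Int) (st : List Int × (List (Int × Int × Int)) × Int) (i : Int) :
    List Int × (List (Int × Int × Int)) × Int :=
  let L := st.1
  let moves := st.2.1
  let dist := st.2.2
  -- rank1[i] raises IndexError when len(rank2) > len(rank1): excluded by Pre_ (default never read there)
  if PySem.List.pyGetD L i 0 ≠ PySem.List.pyGetD rank2 i 0 then
    match (PySem.List.pyRange (i + 1) (L.length : Int) 1).find?
        (fun j => PySem.List.pyGetD L j 0 == PySem.List.pyGetD rank2 i 0) with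
    | some j =>
      match PySem.List.pop? L j with
      | some (x, L') => (PySem.List.insert L' i x, moves ++ [(i, j, i)], dist + (j - i))
      | none => (L, moves, dist)   -- unreachable: j < len(L)
    | none => (L, moves, dist)     -- no match found: inner loop falls through, no action
  else (L, moves, dist)

def selection_predictor (rank1 : List Int) (rank2 : List Int) : Int × (List (Int × Int × Int)) × Int :=
  pvAfin ((PySem.List.pyRange 0 (rank2.length : Int) 1).foldl (pvA_step rank2) (rank1, [], 0))

-- ===== PORT B =====
-- Source B's loop 'for i, t in enumerate(rank2)' over state (suffix, moves, dist)
def pvB_loop : List Int → Int → List Int → List (Int × Int × Int) → Int →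
    Int × (List (Int × Int × Int)) × Int
  | [], _, _, moves, dist => ((moves.length : Int), moves, dist)
  | t :: ts, i, suffix, moves, dist =>
    -- suffix[0] raises IndexError when suffix is empty: excluded by Pre_ (default never read there)
    let rest := PySem.List.slice suffix (some 1) none      -- suffix[1:]
    if suffix.headD 0 != t && rest.contains t then
      let k : Nat := (PySem.List.index? rest t).getD 0 + 1 -- suffix[1:].index(t) + 1, guarded by 't in rest'
      pvB_loop ts (i + 1) (suffix.eraseIdx k) (moves ++ [(i, i + (k : Int), i)]) (dist + (k : Int))
    else
      pvB_loop ts (i + 1) (suffix.eraseIdx 0) moves dist   -- del suffix[0]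

def selection_predictor_alt (rank1 : List Int) (rank2 : List Int) : Int × (List (Int × Int × Int)) × Int :=
  pvB_loop rank2 0 rank1 [] 0

-- ===== PRECONDITION & SPEC =====
-- A raises IndexError (rank1[i]) as soon as i reaches len(rank1) < len(rank2); only that is excluded.
def Pre_selection_predictor (rank1 : List Int) (rank2 : List Int) : Prop :=
  rank2.length ≤ rank1.length
instance (rank1 : List Int) (rank2 : List Int) : Decidable (Pre_selection_predictor rank1 rank2) := by
  unfold Pre_selection_predictor; infer_instance
def pvWitness_selection_predictor : List Int × List Int := ([3, 1, 2], [1, 2, 3])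

def Spec_selection_predictor (rank1 : List Int) (rank2 : List Int) (out : Int × (List (Int × Int × Int)) × Int) : Prop := out = selection_predictor_alt rank1 rank2
instance (rank1 : List Int) (rank2 : List Int) (out : Int × (List (Int × Int × Int)) × Int) : Decidable (Spec_selection_predictor rank1 rank2 out) := by unfold Spec_selection_predictor; infer_instance

-- ===== CLAIM (what is proved, stated in full; the proofs are below) =====
def Claim_equal_selection_predictor : Prop := ∀ (rank1 : List Int) (rank2 : List Int), Dom_selection_predictor rank1 rank2 → Pre_selection_predictor rank1 rank2 → Spec_selection_predictor rank1 rank2 (selection_predictor rank1 rank2)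

-- ===== LEMMAS AND PROOFS =====

-- reading the element just past a placed prefix
lemma pvGetD_append (P Q : List Int) (y : Int) :
    PySem.List.pyGetD (P ++ y :: Q) ((P.length : Nat) : Int) 0 = y := by
  rw [PySem.List.pyGetD_natCast]
  simp [List.getD]

-- A's inner scan over range(i+1, len) is the first index of the target in the tail, shifted
lemma pvFind (t : Int) (Q : List Int) : ∀ (P : List Int),
    (PySem.List.pyRange ((P.length : Nat) : Int) (((P ++ Q).length : Nat) : Int) 1).find?
        (fun j => PySem.List.pyGetD (P ++ Q) j 0 == t)
    = (PySem.List.index? Q t).map (fun m => (((P.length + m : Nat) : Nat) : Int)) := by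
  induction Q with
  | nil =>
    intro P
    rw [PySem.List.pyRange_one_eq_nil (by simp)]
    simp [PySem.List.index?_eq_idxOf?]
  | cons q Q' ih =>
    intro P
    have hlt : ((P.length : Nat) : Int) < (((P ++ q :: Q').length : Nat) : Int) := by
      simp only [List.length_append, List.length_cons]
      omega
    rw [PySem.List.pyRange_one_cons hlt]
    by_cases hq : q = t
    · subst hq
      rw [List.find?_cons_of_pos (by simp)]
      rw [PySem.List.index?_eq_idxOf?, List.idxOf?_cons]
      simp
    · rw [List.find?_cons_of_neg (by simp [hq])]
      have e1 : P ++ q :: Q' = (P ++ [q]) ++ Q' := by simp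
      have e2 : ((P.length : Nat) : Int) + 1 = ((((P ++ [q]).length : Nat) : Nat) : Int) := by
        simp
      rw [e1, e2, ih (P ++ [q])]
      rw [PySem.List.index?_cons_of_ne Q' hq]
      cases PySem.List.index? Q' t with
      | none => simp
      | some m => simp; omega

-- the induction engine: A's fold from position |P| on P ++ S equals B's loop on the suffix S
lemma pvKey (ts : List Int) : ∀ (R0 P S : List Int) (moves : List (Int × Int × Int)) (dist : Int),
    R0.length = P.length → ts.length ≤ S.length →
    pvAfin ((PySem.List.pyRange ((P.length : Nat) : Int) (((R0 ++ ts).length : Nat) : Int) 1).foldl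
        (pvA_step (R0 ++ ts)) (P ++ S, moves, dist))
    = pvB_loop ts ((P.length : Nat) : Int) S moves dist := by
  induction ts with
  | nil =>
    intro R0 P S moves dist hR hS
    rw [PySem.List.pyRange_one_eq_nil (by simp [hR])]
    simp [pvAfin, pvB_loop]
  | cons t ts' ih =>
    intro R0 P S moves dist hR hS
    obtain ⟨s0, S', rfl⟩ : ∃ s0 S', S = s0 :: S' := by
      cases S with
      | nil => simp at hS
      | cons a b => exact ⟨a, b, rfl⟩
    have hlt : ((P.length : Nat) : Int) < (((R0 ++ t :: ts').length : Nat) : Int) := by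
      simp only [List.length_append, List.length_cons]
      omega
    rw [PySem.List.pyRange_one_cons hlt, List.foldl_cons]
    have hA2 : PySem.List.pyGetD (R0 ++ t :: ts') ((P.length : Nat) : Int) 0 = t := by
      rw [← hR]; exact pvGetD_append R0 ts' t
    have hA1 : PySem.List.pyGetD (P ++ s0 :: S') ((P.length : Nat) : Int) 0 = s0 :=
      pvGetD_append P S' s0
    have e2 : (((P ++ [s0]).length : Nat) : Int) = ((P.length : Nat) : Int) + 1 := by simp
    have eR : (R0 ++ [t]) ++ ts' = R0 ++ t :: ts' := by simp
    have eP : (P ++ [s0]) ++ S' = P ++ s0 :: S' := by simp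
    have hS' : ts'.length ≤ S'.length := by simp at hS; omega
    by_cases h0 : s0 = t
    · -- already in place: A does nothing, B drops the head
      subst h0
      have hstep : pvA_step (R0 ++ s0 :: ts') (P ++ s0 :: S', moves, dist) ((P.length : Nat) : Int)
          = (P ++ s0 :: S', moves, dist) := by
        simp only [pvA_step]
        rw [hA1, hA2]
        simp
      rw [hstep, pvB_loop]
      simp only [PySem.List.slice_from_one, List.tail_cons]
      rw [if_neg (by simp)]
      have key := ih (R0 ++ [s0]) (P ++ [s0]) S' moves dist (by simp [hR]) hS'
      rw [e2, eR, eP] at key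
      simpa using key
    · -- head differs: both sides look for t in the tail S'
      have hfind := pvFind t S' (P ++ [s0])
      rw [e2, eP] at hfind
      cases hidx : PySem.List.index? S' t with
      | none =>
        have hmem : t ∉ S' := (PySem.List.index?_eq_none_iff S' t).1 hidx
        rw [hidx] at hfind
        simp only [Option.map_none] at hfind
        have hstep : pvA_step (R0 ++ t :: ts') (P ++ s0 :: S', moves, dist) ((P.length : Nat) : Int)
            = (P ++ s0 :: S', moves, dist) := by
          simp only [pvA_step]
          rw [hA1, hA2, if_pos h0, hfind]
        rw [hstep, pvB_loop]
        simp only [PySem.List.slice_from_one, List.tail_cons]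
        rw [if_neg (by simp [hmem])]
        have key := ih (R0 ++ [t]) (P ++ [s0]) S' moves dist (by simp [hR]) hS'
        rw [e2, eR, eP] at key
        simpa using key
      | some m =>
        obtain ⟨hmlt, hSm, -⟩ := PySem.List.getElem_of_index?_eq_some hidx
        rw [hidx] at hfind
        simp only [Option.map_some] at hfind
        have e3 : ((((P ++ [s0]).length + m : Nat) : Nat) : Int) = ((P.length + 1 + m : Nat) : Int) := by
          simp
        rw [e3] at hfind
        have hn : P.length + 1 + m < (P ++ s0 :: S').length := by
          simp only [List.length_append, List.length_cons]
          omega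
        have hpop := PySem.List.pop?_natCast (P ++ s0 :: S') (P.length + 1 + m) hn
        have hget : (P ++ s0 :: S')[P.length + 1 + m]'hn = t := by
          have h1 : (P ++ s0 :: S')[P.length + 1 + m]? = some t := by
            rw [← eP, List.getElem?_append_right
              (by simp only [List.length_append, List.length_cons, List.length_nil]; omega)]
            simp only [List.length_append, List.length_nil, List.length_cons]
            have : P.length + 1 + m - (P.length + 1) = m := by omega
            rw [this, List.getElem?_eq_getElem hmlt, hSm]
          rw [List.getElem?_eq_getElem hn] at h1
          exact Option.some.inj h1
        have herase : (P ++ s0 :: S').eraseIdx (P.length + 1 + m) = P ++ s0 :: S'.eraseIdx m := by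
          rw [← eP, List.eraseIdx_append,
            if_neg (by simp only [List.length_append, List.length_cons, List.length_nil]; omega)]
          simp
        rw [hget, herase] at hpop
        have hins : PySem.List.insert (P ++ s0 :: S'.eraseIdx m) ((P.length : Nat) : Int) t
            = P ++ t :: s0 :: S'.eraseIdx m := by
          rw [PySem.List.insert_natCast _ _ _ (by simp)]
          simp
        have e4 : ((P.length + 1 + m : Nat) : Int)
            = ((P.length : Nat) : Int) + ((m : Nat) + 1 : Int) := by
          push_cast
          omega
        have hstep : pvA_step (R0 ++ t :: ts') (P ++ s0 :: S', moves, dist) ((P.length : Nat) : Int)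
            = (P ++ t :: s0 :: S'.eraseIdx m,
               moves ++ [(((P.length : Nat) : Int),
                 ((P.length : Nat) : Int) + ((m : Nat) + 1 : Int), ((P.length : Nat) : Int))],
               dist + ((m : Nat) + 1 : Int)) := by
          simp only [pvA_step]
          rw [hA1, hA2, if_pos h0]
          simp only [hfind]
          simp only [hpop, hins]
          rw [e4]
          have e5 : ((P.length : Nat) : Int) + ((m : Nat) + 1 : Int) - ((P.length : Nat) : Int)
              = ((m : Nat) + 1 : Int) := by ring
          rw [e5]
        have hmem : t ∈ S' := (PySem.List.index?_isSome_iff S' t).1 (by rw [hidx]; rfl)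
        rw [hstep, pvB_loop]
        simp only [PySem.List.slice_from_one, List.tail_cons]
        rw [if_pos (by simp [h0, hmem])]
        simp only [hidx, Option.getD_some, List.eraseIdx_cons_succ]
        have key := ih (R0 ++ [t]) (P ++ [t]) (s0 :: S'.eraseIdx m)
            (moves ++ [(((P.length : Nat) : Int),
              ((P.length : Nat) : Int) + ((m : Nat) + 1 : Int), ((P.length : Nat) : Int))])
            (dist + ((m : Nat) + 1 : Int))
            (by simp [hR])
            (by simp [List.length_eraseIdx, hmlt]; omega)
        have e2t : (((P ++ [t]).length : Nat) : Int) = ((P.length : Nat) : Int) + 1 := by simp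
        have eRt : (R0 ++ [t]) ++ ts' = R0 ++ t :: ts' := by simp
        have ePt : (P ++ [t]) ++ (s0 :: S'.eraseIdx m) = P ++ t :: s0 :: S'.eraseIdx m := by simp
        rw [e2t, eRt, ePt] at key
        simpa [Nat.cast_add, Nat.cast_one] using key

-- ===== VERDICT (by name: the statement is the Claim_ definition above) =====
theorem selection_predictor_spec : Claim_equal_selection_predictor := by
  intro rank1 rank2 _ hpre
  show selection_predictor rank1 rank2 = selection_predictor_alt rank1 rank2
  have h := pvKey rank2 [] [] rank1 [] 0 rfl hpre
  simpa [selection_predictor, selection_predictor_alt] using h
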